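-- pv_equiv track=rewrite | github.com/MrBrantCode/unitest_baseline | mut_generate/mist_train_taco/taco_9364/solution.py | calculate_olp_sums
-- ===== SOURCE A (Python) =====
-- def calculate_olp_sums(n, arr):
--     a = 0
--     b = 0
--     c = 0
--
--     for i in range(0, n, 3):
--         if i < n:
--             a += arr[i]
--         if i + 1 < n:
--             b += arr[i + 1]
--         if i + 2 < n:
--             c += arr[i + 2]
--
--     return (a, b, c)
-- ===== SOURCE B (Python) =====
-- def calculate_olp_sums(n, arr):
--     # Walk the array back-to-front, rotating the accumulator triple one slot
--     # per step; after processing suffix [i:n], slot 0 holds the bucket of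
--     # relative offset 0, so at i == 0 the slots are exactly the mod-3 buckets.
--     a = b = c = 0
--     for i in range(n - 1, -1, -1):
--         a, b, c = arr[i] + c, a, b
--     return (a, b, c)
-- ===== Notes on version B (the rewrite author's own statement) =====
-- stated objective: alternative
-- what changed: B scans the array back-to-front with a rotating accumulator triple (each step shifts the three slots and feeds the new element into slot 0), replacing A's forward stride-3 loop with three separately bounds-checked accumulators; no mod/bucket dispatch anywhere
import Mathlib
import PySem

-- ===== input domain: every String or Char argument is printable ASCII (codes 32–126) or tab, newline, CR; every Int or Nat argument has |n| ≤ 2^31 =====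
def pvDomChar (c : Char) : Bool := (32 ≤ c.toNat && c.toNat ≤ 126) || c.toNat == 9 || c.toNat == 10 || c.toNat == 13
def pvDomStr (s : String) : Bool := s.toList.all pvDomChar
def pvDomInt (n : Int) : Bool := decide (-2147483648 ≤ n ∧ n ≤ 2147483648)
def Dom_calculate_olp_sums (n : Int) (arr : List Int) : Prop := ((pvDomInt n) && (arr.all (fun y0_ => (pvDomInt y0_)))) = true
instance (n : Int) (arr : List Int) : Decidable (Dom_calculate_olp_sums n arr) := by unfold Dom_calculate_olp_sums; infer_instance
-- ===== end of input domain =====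

-- B scans the array back-to-front with a rotating accumulator triple instead of A's
-- forward stride-3 loop with three bounds-checked accumulators; objective: alternative.

-- ===== PORT A =====
def calculate_olp_sums (n : Int) (arr : List Int) : Int × Int × Int :=
  (PySem.List.pyRange 0 n 3).foldl
    (fun t i =>
      let t := if i < n then (t.1 + PySem.List.pyGetD arr i 0, t.2.1, t.2.2) else t
      let t := if i + 1 < n then (t.1, t.2.1 + PySem.List.pyGetD arr (i + 1) 0, t.2.2) else t
      if i + 2 < n then (t.1, t.2.1, t.2.2 + PySem.List.pyGetD arr (i + 2) 0) else t)
    (0, 0, 0)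

-- ===== PORT B =====
def calculate_olp_sums_alt (n : Int) (arr : List Int) : Int × Int × Int :=
  (PySem.List.pyRange (n - 1) (-1) (-1)).foldl
    (fun (t : Int × Int × Int) i => (PySem.List.pyGetD arr i 0 + t.2.2, t.1, t.2.1))
    (0, 0, 0)

-- ===== PRECONDITION & SPEC =====
-- Pre_ excludes exactly the inputs where the Python A raises IndexError: n > len(arr).
def Pre_calculate_olp_sums (n : Int) (arr : List Int) : Prop := n ≤ (arr.length : Int)
instance (n : Int) (arr : List Int) : Decidable (Pre_calculate_olp_sums n arr) := by
  unfold Pre_calculate_olp_sums; infer_instance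
def pvWitness_calculate_olp_sums : Int × List Int := (5, [1, 2, 3, 4, 5])

def Spec_calculate_olp_sums (n : Int) (arr : List Int) (out : Int × Int × Int) : Prop := out = calculate_olp_sums_alt n arr
instance (n : Int) (arr : List Int) (out : Int × Int × Int) : Decidable (Spec_calculate_olp_sums n arr out) := by unfold Spec_calculate_olp_sums; infer_instance

-- ===== CLAIM (what is proved, stated in full; the proofs are below) =====
def Claim_equal_calculate_olp_sums : Prop := ∀ (n : Int) (arr : List Int), Dom_calculate_olp_sums n arr → Pre_calculate_olp_sums n arr → Spec_calculate_olp_sums n arr (calculate_olp_sums n arr)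

-- ===== LEMMAS AND PROOFS =====

-- add x into bucket k % 3 of a triple
def bump (t : Int × Int × Int) (k : Nat) (x : Int) : Int × Int × Int :=
  if k % 3 = 0 then (t.1 + x, t.2.1, t.2.2)
  else if k % 3 = 1 then (t.1, t.2.1 + x, t.2.2)
  else (t.1, t.2.1, t.2.2 + x)

-- Reference triple: sums of arr[0..m-1] bucketed by index mod 3.
def tri (arr : List Int) : Nat → Int × Int × Int
  | 0 => (0, 0, 0)
  | m + 1 => bump (tri arr m) m (arr.getD m 0)

theorem tri_succ (arr : List Int) (m : Nat) :
    tri arr (m + 1) =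
      (if m % 3 = 0 then ((tri arr m).1 + arr.getD m 0, (tri arr m).2.1, (tri arr m).2.2)
       else if m % 3 = 1 then ((tri arr m).1, (tri arr m).2.1 + arr.getD m 0, (tri arr m).2.2)
       else ((tri arr m).1, (tri arr m).2.1, (tri arr m).2.2 + arr.getD m 0)) := rfl

theorem tri_one (arr : List Int) (m : Nat) (h : m % 3 = 0) :
    tri arr (m + 1) = ((tri arr m).1 + arr.getD m 0, (tri arr m).2.1, (tri arr m).2.2) := by
  rw [tri_succ, if_pos h]

theorem tri_two (arr : List Int) (m : Nat) (h : m % 3 = 0) :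
    tri arr (m + 2) =
      ((tri arr m).1 + arr.getD m 0, (tri arr m).2.1 + arr.getD (m + 1) 0, (tri arr m).2.2) := by
  have e : m + 2 = (m + 1) + 1 := rfl
  rw [e, tri_succ, if_neg (by omega), if_pos (by omega : (m + 1) % 3 = 1), tri_one arr m h]

theorem tri_three (arr : List Int) (m : Nat) (h : m % 3 = 0) :
    tri arr (m + 3) =
      ((tri arr m).1 + arr.getD m 0, (tri arr m).2.1 + arr.getD (m + 1) 0,
        (tri arr m).2.2 + arr.getD (m + 2) 0) := by
  have e : m + 3 = (m + 2) + 1 := rfl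
  rw [e, tri_succ, if_neg (by omega), if_neg (by omega), tri_two arr m h]

theorem afold (arr : List Int) (n : Int) (K : Nat) :
    (List.range K).foldl
      (fun t (k : Nat) =>
        (fun (t : Int × Int × Int) (i : Int) =>
          let t := if i < n then (t.1 + PySem.List.pyGetD arr i 0, t.2.1, t.2.2) else t
          let t := if i + 1 < n then (t.1, t.2.1 + PySem.List.pyGetD arr (i + 1) 0, t.2.2) else t
          if i + 2 < n then (t.1, t.2.1, t.2.2 + PySem.List.pyGetD arr (i + 2) 0) else t)
          t (0 + 3 * (k : Int)))
      (0, 0, 0)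
      = tri arr (min n.toNat (3 * K)) := by
  induction K with
  | zero => simp [tri]
  | succ K ih =>
    rw [List.range_succ, List.foldl_append, ih]
    simp only [List.foldl_cons, List.foldl_nil, zero_add]
    have e0 : (3 * (K : Int)) = ((3 * K : Nat) : Int) := by push_cast; ring
    have e1 : ((3 * K : Nat) : Int) + 1 = ((3 * K + 1 : Nat) : Int) := by push_cast; ring
    have e2 : ((3 * K : Nat) : Int) + 2 = ((3 * K + 2 : Nat) : Int) := by push_cast; ring
    have r0 : (3 * K) % 3 = 0 := by omega
    have p0 : PySem.List.pyGetD arr (3 * (K : Int)) 0 = arr[3 * K]?.getD 0 := by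
      rw [e0, PySem.List.pyGetD_natCast, List.getD_eq_getElem?_getD]
    have p1 : PySem.List.pyGetD arr (3 * (K : Int) + 1) 0 = arr[3 * K + 1]?.getD 0 := by
      rw [e0, e1, PySem.List.pyGetD_natCast, List.getD_eq_getElem?_getD]
    have p2 : PySem.List.pyGetD arr (3 * (K : Int) + 2) 0 = arr[3 * K + 2]?.getD 0 := by
      rw [e0, e2, PySem.List.pyGetD_natCast, List.getD_eq_getElem?_getD]
    by_cases g1 : 3 * (K : Int) < n
    · have hmin : min n.toNat (3 * K) = 3 * K := by omega
      by_cases g2 : 3 * (K : Int) + 1 < n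
      · by_cases g3 : 3 * (K : Int) + 2 < n
        · have hm1 : min n.toNat (3 * (K + 1)) = 3 * K + 3 := by omega
          rw [hm1, tri_three arr (3 * K) r0, hmin]
          simp only [if_pos g1, if_pos g2, if_pos g3]
          simp [p0, p1, p2]
        · have hm1 : min n.toNat (3 * (K + 1)) = 3 * K + 2 := by omega
          rw [hm1, tri_two arr (3 * K) r0, hmin]
          simp only [if_pos g1, if_pos g2, if_neg g3]
          simp [p0, p1]
      · have g3 : ¬ (3 * (K : Int) + 2 < n) := by omega
        have hm1 : min n.toNat (3 * (K + 1)) = 3 * K + 1 := by omega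
        rw [hm1, tri_one arr (3 * K) r0, hmin]
        simp only [if_pos g1, if_neg g2, if_neg g3]
        simp [p0]
    · have g2 : ¬ (3 * (K : Int) + 1 < n) := by omega
      have g3 : ¬ (3 * (K : Int) + 2 < n) := by omega
      have hm1 : min n.toNat (3 * (K + 1)) = min n.toNat (3 * K) := by omega
      rw [hm1]
      simp only [if_neg g1, if_neg g2, if_neg g3]

theorem aport_eq_tri (arr : List Int) (n : Int) :
    calculate_olp_sums n arr = tri arr n.toNat := by
  unfold calculate_olp_sums
  rw [PySem.List.pyRange_of_pos 0 n (by norm_num : (0 : Int) < 3)]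
  rw [List.foldl_map]
  have h := afold arr n (if 0 < n then ((n - 0 + 3 - 1) / 3).toNat else 0)
  rw [h]
  congr 1
  by_cases hn : 0 < n
  · simp only [if_pos hn]
    omega
  · simp only [if_neg hn]
    omega

-- sums of indices s..s+k-1 of arr, bucketed by (index - s) % 3,
-- computed back-to-front with a rotating triple (the shape of B's loop body)
def suf (arr : List Int) (s : Nat) : Nat → Int × Int × Int
  | 0 => (0, 0, 0)
  | k + 1 =>
    let t := suf arr (s + 1) k
    (arr.getD s 0 + t.2.2, t.1, t.2.1)

theorem suf_bump (arr : List Int) (k : Nat) : ∀ s : Nat,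
    suf arr s (k + 1) = bump (suf arr s k) k (arr.getD (s + k) 0) := by
  induction k with
  | zero => intro s; simp [suf, bump]
  | succ k ih =>
    intro s
    show (arr.getD s 0 + (suf arr (s + 1) (k + 1)).2.2, (suf arr (s + 1) (k + 1)).1,
          (suf arr (s + 1) (k + 1)).2.1) = _
    rw [ih (s + 1)]
    have e : s + 1 + k = s + (k + 1) := by omega
    rw [e]
    have h3 : k % 3 = 0 ∨ k % 3 = 1 ∨ k % 3 = 2 := by omega
    rcases h3 with h | h | h <;>
      simp [bump, suf, h, (by omega : (k + 1) % 3 = (k % 3 + 1) % 3)] <;> ring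

theorem suf_eq_tri (arr : List Int) (m : Nat) : suf arr 0 m = tri arr m := by
  induction m with
  | zero => rfl
  | succ m ih => rw [suf_bump, ih]; simp [tri]

theorem bfold (arr : List Int) (k : Nat) : ∀ s : Nat,
    ((List.range k).map (fun j : Nat => ((s : Int) + (k : Int) - 1 - (j : Int)))).foldl
      (fun (t : Int × Int × Int) i => (PySem.List.pyGetD arr i 0 + t.2.2, t.1, t.2.1))
      (0, 0, 0)
      = suf arr s k := by
  induction k with
  | zero => intro s; simp [suf]
  | succ k ih =>
    intro s
    rw [List.range_succ, List.map_append, List.foldl_append]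
    have efun : (fun j : Nat => ((s : Int) + ((k + 1 : Nat) : Int) - 1 - (j : Int))) =
        (fun j : Nat => (((s + 1 : Nat) : Int) + (k : Int) - 1 - (j : Int))) := by
      funext j; push_cast; ring
    rw [efun, ih (s + 1)]
    have elast : (((s + 1 : Nat) : Int) + k - 1 - (k : Int)) = ((s : Nat) : Int) := by
      push_cast; ring
    simp only [List.map_cons, List.map_nil, List.foldl_cons, List.foldl_nil, elast]
    rw [PySem.List.pyGetD_natCast, List.getD_eq_getElem?_getD]
    rfl

theorem bport_eq_tri (arr : List Int) (n : Int) :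
    calculate_olp_sums_alt n arr = tri arr n.toNat := by
  unfold calculate_olp_sums_alt
  rw [PySem.List.pyRange_neg_one]
  have hlen : (n - 1 - (-1)).toNat = n.toNat := by omega
  rw [hlen]
  by_cases hn : 0 < n
  · have efun : (fun k : Nat => n - 1 - (k : Int)) =
        (fun j : Nat => (((0 : Nat) : Int) + (n.toNat : Int) - 1 - j)) := by
      funext j
      have : ((n.toNat : Int)) = n := by omega
      rw [this]; ring
    rw [efun, bfold arr n.toNat 0, suf_eq_tri]
  · have h0 : n.toNat = 0 := by omega
    rw [h0]
    rfl

-- ===== VERDICT (by name: the statement is the Claim_ definition above) =====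
theorem calculate_olp_sums_spec : Claim_equal_calculate_olp_sums := by
  intro n arr _ _
  unfold Spec_calculate_olp_sums
  rw [aport_eq_tri, bport_eq_tri]
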